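-- pv_equiv track=rewrite | github.com/akbota123/BFDjango | week1/codeingbat/List2Sum13.py | sum13
-- ===== SOURCE A (Python) =====
-- def sum13(nums):
--   if len(nums)==0:
--     return 0
--   for n in range(0, len(nums)):
--     if nums[n]==13:
--       nums[n]=0
--       if n+1<len(nums):
--         nums[n+1]=0
--   return sum(nums)
-- ===== SOURCE B (Python) =====
-- def sum13(nums):
--   total = 0
--   prev13 = False
--   for x in nums:
--     if prev13:
--       prev13 = False
--     elif x == 13:
--       prev13 = True
--     else:
--       total += x
--   return total
-- ===== Notes on version B (the rewrite author's own statement) =====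
-- stated objective: simpler
-- what changed: One accumulating pass with a look-behind boolean flag replaces A's in-place index loop that zeroes cells plus a separate sum(); B never mutates the list (A's in-place zeroing is a side effect not reproduced).
import Mathlib
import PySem

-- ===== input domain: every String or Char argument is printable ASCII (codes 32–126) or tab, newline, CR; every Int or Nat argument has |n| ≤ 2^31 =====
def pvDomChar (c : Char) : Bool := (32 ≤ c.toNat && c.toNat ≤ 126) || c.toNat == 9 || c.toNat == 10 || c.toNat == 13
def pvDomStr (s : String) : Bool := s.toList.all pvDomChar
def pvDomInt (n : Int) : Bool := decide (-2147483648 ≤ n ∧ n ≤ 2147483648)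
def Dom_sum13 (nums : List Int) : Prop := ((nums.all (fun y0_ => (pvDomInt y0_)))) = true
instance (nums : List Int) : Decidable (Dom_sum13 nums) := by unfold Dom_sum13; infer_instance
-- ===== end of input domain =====

-- B replaces A's mutate-cells-then-sum() index loop with one non-mutating accumulating
-- pass carrying a look-behind flag (A's in-place zeroing side effect is not reproduced;
-- the equivalence is about the return value only).

-- ===== PORT A =====
-- loop body of `for n in range(0, len(nums))`; indices are 0..len-1 so `getD n 0`
-- is exact for `nums[n]` (always in range).
def sum13Step (arr : List Int) (n : Nat) : List Int :=
  if arr.getD n 0 == 13 then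
    let a1 := arr.set n 0
    if n + 1 < a1.length then a1.set (n + 1) 0 else a1
  else arr

def sum13 (nums : List Int) : Int :=
  if nums.length == 0 then 0
  else ((List.range nums.length).foldl sum13Step nums).sum

-- ===== PORT B =====
def sum13AltStep (st : Int × Bool) (x : Int) : Int × Bool :=
  if st.2 then (st.1, false)
  else if x == 13 then (st.1, true)
  else (st.1 + x, false)

def sum13_alt (nums : List Int) : Int :=
  (nums.foldl sum13AltStep (0, false)).1

-- ===== PRECONDITION & SPEC =====
def Spec_sum13 (nums : List Int) (out : Int) : Prop := out = sum13_alt nums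
instance (nums : List Int) (out : Int) : Decidable (Spec_sum13 nums out) := by unfold Spec_sum13; infer_instance

-- ===== CLAIM (what is proved, stated in full; the proofs are below) =====
def Claim_equal_sum13 : Prop := ∀ (nums : List Int), Dom_sum13 nums → Spec_sum13 nums (sum13 nums)

-- ===== LEMMAS AND PROOFS =====

-- structural characterisation of A's mutated array
def loopA : List Int → List Int
  | [] => []
  | [h] => if h == 13 then [0] else [h]
  | h :: x :: t => if h == 13 then 0 :: 0 :: loopA t else h :: loopA (x :: t)

theorem foldl_step_prefix : ∀ (l p : List Int),
    (List.range' p.length l.length 1).foldl sum13Step (p ++ l) = p ++ loopA l := by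
  intro l
  induction l using loopA.induct with
  | case1 => intro p; simp [loopA]
  | case2 h h13 =>
    intro p
    simp [loopA, sum13Step, h13, List.length_append]
  | case3 h h13 =>
    intro p
    simp [loopA, sum13Step, h13]
  | case4 h x t h13 ih =>
    intro p
    have hh : h = 13 := by simpa using h13
    subst hh
    have e1 : List.range' p.length (t.length + 2) 1
        = p.length :: (p.length + 1) :: List.range' (p.length + 2) t.length 1 := by
      simp [List.range']
    have s1 : sum13Step (p ++ 13 :: x :: t) p.length = p ++ 0 :: 0 :: t := by
      simp [sum13Step, List.length_append]
    have s2 : sum13Step (p ++ 0 :: 0 :: t) (p.length + 1) = p ++ 0 :: 0 :: t := by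
      have hg : (p ++ 0 :: 0 :: t).getD (p.length + 1) 0 = 0 := by
        have : (p ++ 0 :: 0 :: t).getD (p.length + 1) 0
            = (0 :: 0 :: t).getD 1 0 := by
          rw [List.getD_append_right] <;> simp
        simp
      simp [sum13Step]
    have ih' := ih (p ++ [0, 0])
    simp only [List.length_append, List.length_cons, List.length_nil] at ih'
    have e2 : p ++ [0, 0] ++ t = p ++ 0 :: 0 :: t := by simp
    rw [e2] at ih'
    simp only [loopA, if_pos h13, List.length_cons, e1, List.foldl_cons, s1, s2]
    simpa using ih'
  | case5 h x t h13 ih =>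
    intro p
    have e1 : List.range' p.length (t.length + 1 + 1) 1
        = p.length :: List.range' (p.length + 1) (t.length + 1) 1 := by
      simp [List.range']
    have s1 : sum13Step (p ++ h :: x :: t) p.length = p ++ h :: x :: t := by
      simp [sum13Step, h13]
    have ih' := ih (p ++ [h])
    simp only [List.length_append, List.length_cons, List.length_nil] at ih'
    have e2 : p ++ [h] ++ (x :: t) = p ++ h :: x :: t := by simp
    rw [e2] at ih'
    simp only [loopA, if_neg h13, List.length_cons, e1, List.foldl_cons, s1]
    simpa using ih'

theorem loopA_A : ∀ (nums : List Int), sum13 nums = (loopA nums).sum := by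
  intro nums
  match nums with
  | [] => simp [sum13, loopA]
  | h :: t =>
    have := foldl_step_prefix (h :: t) []
    simp only [List.length_nil, List.nil_append, List.length_cons] at this
    simp [sum13, List.range_eq_range', this]

theorem alt_loopA : ∀ (l : List Int) (s : Int),
    (l.foldl sum13AltStep (s, false)).1 = s + (loopA l).sum := by
  intro l
  induction l using loopA.induct with
  | case1 => intro s; simp [loopA]
  | case2 h h13 => intro s; simp [loopA, sum13AltStep, h13]
  | case3 h h13 => intro s; simp [loopA, sum13AltStep, h13]
  | case4 h x t h13 ih =>
    intro s
    simp only [List.foldl_cons, sum13AltStep, if_pos h13, if_neg Bool.false_ne_true]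
    simp only [loopA, if_pos h13]
    have := ih s
    simp only [List.sum_cons, zero_add]
    simpa using this
  | case5 h x t h13 ih =>
    intro s
    have e : sum13AltStep (s, false) h = (s + h, false) := by
      simp [sum13AltStep, h13]
    rw [List.foldl_cons, e, ih (s + h)]
    simp only [loopA, if_neg h13, List.sum_cons]
    ring

-- ===== VERDICT (by name: the statement is the Claim_ definition above) =====
theorem sum13_spec : Claim_equal_sum13 := by
  intro nums _
  unfold Spec_sum13 sum13_alt
  rw [loopA_A, alt_loopA]
  simp
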